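-- pv_equiv track=rewrite | github.com/drastamat200/PasswordStrengthChecker | PasswordStrengthGUI.py | check_repeated_sequences
-- ===== SOURCE A (Python) =====
-- from typing import Dict, List
--
-- def check_repeated_sequences(password: str) -> List[str]:
--     sequences = []
--     for i in range(len(password)-2):
--         for j in range(i+3, len(password)+1):
--             sequence = password[i:j]
--             if password.count(sequence) > 1:
--                 sequences.append(sequence)
--     return sorted(sequences, key=len, reverse=True)
-- ===== SOURCE B (Python) =====
-- from typing import List
--
-- def check_repeated_sequences(password: str) -> List[str]:
--     # Hash-index approach: for each length (longest first, so the output is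
--     # already in A's stable length-descending order), one pass records each
--     # substring's first and last start position in dicts; a substring repeats
--     # (has a second non-overlapping occurrence) iff last - first >= length.
--     # No count()/find() rescans and no sort call.
--     n = len(password)
--     result = []
--     for length in range(n, 2, -1):
--         first = {}
--         last = {}
--         for i in range(n - length + 1):
--             s = password[i:i + length]
--             if s not in first:
--                 first[s] = i
--             last[s] = i
--         for i in range(n - length + 1):
--             s = password[i:i + length]
--             if last[s] - first[s] >= length:
--                 result.append(s)
--     return result
-- ===== Notes on version B (the rewrite author's own statement) =====
-- stated objective: faster
-- what changed: B replaces A's per-substring count() rescans and final sort with a per-length hash index: one pass records each substring's first and last start position in two dicts, repetition becomes the O(1) test last-first >= length, and lengths are emitted longest-first so no sort is needed.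
import Mathlib
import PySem

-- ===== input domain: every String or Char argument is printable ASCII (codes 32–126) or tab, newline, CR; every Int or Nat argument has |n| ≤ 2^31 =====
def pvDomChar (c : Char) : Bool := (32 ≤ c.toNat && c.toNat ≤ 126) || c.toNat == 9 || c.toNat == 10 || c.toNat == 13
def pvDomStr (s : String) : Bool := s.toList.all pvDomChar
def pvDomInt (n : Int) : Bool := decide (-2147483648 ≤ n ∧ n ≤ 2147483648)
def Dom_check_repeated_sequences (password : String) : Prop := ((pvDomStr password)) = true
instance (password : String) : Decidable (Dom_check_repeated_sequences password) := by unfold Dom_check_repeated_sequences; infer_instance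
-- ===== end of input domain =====

-- B indexes, per length (longest first, so no sort is needed), every substring's first and
-- last start position in two dicts built in one pass; 'repeated' becomes the O(1) test
-- last - first >= length instead of A's count() rescan; objective: faster.

-- ===== PORT A =====
def check_repeated_sequences (password : String) : List String :=
  let sequences : List String :=
    (PySem.List.pyRange 0 (PySem.Str.len password - 2) 1).foldl (fun acc i =>
      (PySem.List.pyRange (i + 3) (PySem.Str.len password + 1) 1).foldl (fun acc2 j =>
        let sequence := PySem.Str.slice password (some i) (some j)
        if 1 < PySem.Str.count password sequence then acc2 ++ [sequence] else acc2) acc) []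
  PySem.List.sorted sequences (fun t => PySem.Str.len t) true

-- ===== PORT B =====
-- (keys looked up in the second loop are always present — each i was inserted in the first
-- loop — so Python's first[s]/last[s] never raises; ported as getD with default 0)
def check_repeated_sequences_alt (password : String) : List String :=
  (PySem.List.pyRange (PySem.Str.len password) 2 (-1)).foldl (fun acc length =>
    let pair := (PySem.List.pyRange 0 (PySem.Str.len password - length + 1) 1).foldl
      (fun fl i =>
        let s := PySem.Str.slice password (some i) (some (i + length))
        ((if fl.1.contains s then fl.1 else fl.1.insert s i), fl.2.insert s i))
      (PySem.Dict.empty, PySem.Dict.empty)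
    (PySem.List.pyRange 0 (PySem.Str.len password - length + 1) 1).foldl (fun acc2 i =>
      let s := PySem.Str.slice password (some i) (some (i + length))
      if length ≤ pair.2.getD s 0 - pair.1.getD s 0 then acc2 ++ [s] else acc2) acc) []

-- ===== PRECONDITION & SPEC =====
def Spec_check_repeated_sequences (password : String) (out : List String) : Prop := out = check_repeated_sequences_alt password
instance (password : String) (out : List String) : Decidable (Spec_check_repeated_sequences password out) := by unfold Spec_check_repeated_sequences; infer_instance

-- ===== CLAIM (what is proved, stated in full; the proofs are below) =====
def Claim_equal_check_repeated_sequences : Prop := ∀ (password : String), Dom_check_repeated_sequences password → Spec_check_repeated_sequences password (check_repeated_sequences password)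

-- ===== LEMMAS AND PROOFS =====

-- ---- A's count: non-overlapping occurrence count, characterised ----
def cntR (u : List Char) : List Char → Nat
  | [] => 0
  | c :: t => if u.isPrefixOf (c :: t) then 1 + cntR u (t.drop (u.length - 1)) else cntR u t
  termination_by l => l.length
  decreasing_by all_goals simp

lemma go_eq_cntR (u : List Char) (hu : u ≠ []) :
    ∀ (fuel : Nat) (l : List Char) (acc : Nat), l.length ≤ fuel →
      PySem.Chars.count.go u fuel l acc = acc + cntR u l := by
  intro fuel
  induction fuel with
  | zero => intro l acc h; have : l = [] := by cases l <;> simp_all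
            subst this; simp [PySem.Chars.count.go, cntR]
  | succ f ih =>
    intro l acc h
    cases l with
    | nil => simp [PySem.Chars.count.go, cntR]
    | cons c t =>
      rw [PySem.Chars.count.go]
      by_cases hp : u.isPrefixOf (c :: t)
      · have hlen : 1 ≤ u.length := by cases u <;> simp_all
        have hdrop : (c :: t).drop u.length = t.drop (u.length - 1) := by
          cases hn : u.length with
          | zero => omega
          | succ m => simp
        rw [if_pos hp, hdrop, ih _ _ (by simp at h ⊢; omega)]
        rw [cntR, if_pos hp]
        omega
      · rw [if_neg hp, ih _ _ (by simp at h ⊢; omega), cntR, if_neg hp]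

lemma count_eq_cntR (cs u : List Char) (hu : u ≠ []) :
    PySem.Chars.count cs u = cntR u cs := by
  rw [PySem.Chars.count, if_neg (by simp [hu]), go_eq_cntR u hu cs.length cs 0 le_rfl]
  simp

lemma cntR_pos_iff (u : List Char) (hu : u ≠ []) (l : List Char) :
    0 < cntR u l ↔ u <:+: l := by
  induction l using cntR.induct u with
  | case1 =>
    simp only [cntR, Nat.lt_irrefl, false_iff]
    intro h
    exact hu (List.eq_nil_of_infix_nil h)
  | case2 c t hp ih =>
    rw [cntR, if_pos hp]
    have : u <:+: c :: t := (List.isPrefixOf_iff_prefix.mp hp).isInfix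
    simp [this]
  | case3 c t hp ih =>
    rw [cntR, if_neg hp, ih, List.infix_cons_iff]
    constructor
    · exact Or.inr
    · rintro (h | h)
      · exact absurd (List.isPrefixOf_iff_prefix.mpr h) hp
      · exact h

-- first-occurrence decomposition
lemma cntR_first (u : List Char) (hu : u ≠ []) :
    ∀ (l : List Char) (p : Nat), u <+: l.drop p → (∀ i < p, ¬ u <+: l.drop i) →
      cntR u l = 1 + cntR u (l.drop (p + u.length)) := by
  intro l
  induction l using cntR.induct u with
  | case1 =>
    intro p hocc _
    simp at hocc
    exact absurd hocc hu
  | case2 c t hp ih =>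
    intro p hocc hmin
    have hp0 : p = 0 := by
      by_contra hne
      exact hmin 0 (by omega) (by simpa using List.isPrefixOf_iff_prefix.mp hp)
    subst hp0
    rw [cntR, if_pos hp]
    have hlen : 1 ≤ u.length := by cases u <;> simp_all
    have hdrop : (c :: t).drop (0 + u.length) = t.drop (u.length - 1) := by
      cases hn : u.length with
      | zero => omega
      | succ m => simp
    rw [hdrop]
  | case3 c t hp ih =>
    intro p hocc hmin
    have hpne : p ≠ 0 := by
      intro h; subst h
      exact hp (List.isPrefixOf_iff_prefix.mpr (by simpa using hocc))
    rw [cntR, if_neg hp]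
    have h1 : u <+: t.drop (p - 1) := by
      have : (c :: t).drop p = t.drop (p - 1) := by
        cases hn : p with
        | zero => omega
        | succ m => simp
      rwa [this] at hocc
    have h2 : ∀ i < p - 1, ¬ u <+: t.drop i := by
      intro i hi
      have := hmin (i + 1) (by omega)
      simpa using this
    rw [ih (p - 1) h1 h2]
    congr 1
    have e : p + u.length = (p - 1 + u.length) + 1 := by omega
    rw [e, List.drop_succ_cons]

lemma count_gt_one_iff (cs u : List Char) (hu : u ≠ []) (hocc : u <:+: cs) :
    1 < PySem.Chars.count cs u ↔ u <:+: cs.drop ((PySem.Chars.find cs u).toNat + u.length) := by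
  have hf : 0 ≤ PySem.Chars.find cs u := (PySem.Chars.find_nonneg_iff cs u).mpr hocc
  obtain ⟨h1, h2⟩ := PySem.Chars.find_spec hf
  rw [count_eq_cntR cs u hu, cntR_first u hu cs _ h1 h2]
  have h3 := cntR_pos_iff u hu (cs.drop ((PySem.Chars.find cs u).toNat + u.length))
  constructor
  · intro h; exact h3.mp (by omega)
  · intro h; have := h3.mpr h; omega

-- infix = a prefix of some drop
lemma pv_infix_iff_drop {α : Type} (u l : List α) : u <:+: l ↔ ∃ r : Nat, u <+: l.drop r := by
  constructor
  · rintro ⟨so, t, rfl⟩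
    refine ⟨so.length, ?_⟩
    rw [List.append_assoc, List.drop_left]
    exact ⟨t, rfl⟩
  · rintro ⟨r, h⟩
    exact h.isInfix.trans (List.drop_suffix r l).isInfix

lemma pv_drop_drop {α : Type} (l : List α) (a b : Nat) :
    (l.drop a).drop b = l.drop (a + b) := by
  induction l generalizing a with
  | nil => simp
  | cons c t ih =>
    cases a with
    | zero => simp
    | succ n => simp [Nat.succ_add, ih]

-- ---- generic list facts ----
lemma pv_filter_flatMap {α β : Type} (l : List α) (f : α → List β) (p : β → Bool) :
    (l.flatMap f).filter p = l.flatMap (fun x => (f x).filter p) := by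
  induction l with
  | nil => simp
  | cons a t ih => simp [List.filter_append, ih]

lemma pv_flatMap_if_singleton {α β : Type} (l : List α) (p : α → Bool) (f : α → β) :
    l.flatMap (fun x => if p x then [f x] else []) = (l.filter p).map f := by
  induction l with
  | nil => simp
  | cons a t ih =>
    simp only [List.flatMap_cons, List.filter_cons, ih]
    by_cases h : p a <;> simp [h]

lemma pv_filter_eq_singleton {l : List Int} (hl : l.Nodup) (c : Int) (q : Int → Bool) :
    l.filter (fun j => decide (j = c) && q j) = if c ∈ l ∧ q c then [c] else [] := by
  induction l with
  | nil => simp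
  | cons a t ih =>
    rw [List.nodup_cons] at hl
    simp only [List.filter_cons]
    by_cases hac : a = c
    · subst hac
      have ht : t.filter (fun j => decide (j = a) && q j) = [] := by
        rw [List.filter_eq_nil_iff]
        intro j hj
        simp only [Bool.and_eq_true, decide_eq_true_eq, not_and]
        intro hja; exact absurd (hja ▸ hj) hl.1
      by_cases hq : q a
      · simp [hq, ht]
      · rw [ih hl.2]
        simp [hq, hl.1]
    · rw [ih hl.2]
      by_cases hq : q c
      · by_cases hm : c ∈ t <;> simp [hac, hq, hm, Ne.symm hac]
      · simp [hac, hq]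

lemma pv_head_min {l : List Int} (hl : l.Pairwise (· < ·)) {h : Int} (hh : l.head? = some h) :
    ∀ y ∈ l, h ≤ y := by
  cases l with
  | nil => simp at hh
  | cons a t =>
    simp only [List.head?_cons, Option.some.injEq] at hh
    subst hh
    rw [List.pairwise_cons] at hl
    intro y hy
    rcases List.mem_cons.mp hy with rfl | hy'
    · exact le_rfl
    · exact le_of_lt (hl.1 y hy')

lemma pv_getLast_max {l : List Int} (hl : l.Pairwise (· < ·)) {g : Int} (hg : l.getLast? = some g) :
    ∀ y ∈ l, y ≤ g := by
  induction l with
  | nil => simp at hg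
  | cons a t ih =>
    rw [List.pairwise_cons] at hl
    cases t with
    | nil =>
      simp only [List.getLast?_singleton, Option.some.injEq] at hg
      subst hg
      intro y hy; simp at hy; omega
    | cons b t' =>
      rw [List.getLast?_cons_cons] at hg
      intro y hy
      rcases List.mem_cons.mp hy with rfl | hy'
      · have hg' : g ∈ b :: t' := List.mem_of_getLast? hg
        exact le_of_lt (hl.1 g hg')
      · exact ih hl.2 hg y hy'

-- ---- B's first/last dict pair, characterised ----
def pvFL (key : Int → String) (l : List Int) : PySem.Dict String Int × PySem.Dict String Int :=
  l.foldl (fun fl i =>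
    ((if fl.1.contains (key i) then fl.1 else fl.1.insert (key i) i), fl.2.insert (key i) i))
    (PySem.Dict.empty, PySem.Dict.empty)

lemma pvFL_get (key : Int → String) (l : List Int) :
    ∀ s : String,
      (pvFL key l).1.get? s = (l.filter (fun j => decide (key j = s))).head? ∧
      (pvFL key l).2.get? s = (l.filter (fun j => decide (key j = s))).getLast? := by
  induction l using List.reverseRecOn with
  | nil => intro s; simp [pvFL]
  | append_singleton l x ih =>
    intro s
    obtain ⟨ih1, ih2⟩ := ih s
    have hstep : pvFL key (l ++ [x]) =
        ((if (pvFL key l).1.contains (key x) then (pvFL key l).1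
          else (pvFL key l).1.insert (key x) x), (pvFL key l).2.insert (key x) x) := by
      rw [pvFL, List.foldl_append, ← pvFL]
      simp only [List.foldl_cons, List.foldl_nil]
    rw [hstep, List.filter_append]
    by_cases hxs : key x = s
    · have hfx : [x].filter (fun j => decide (key j = s)) = [x] := by simp [hxs]
      rw [hfx]
      constructor
    -- first dict: unchanged when the key is present, else gets x; head? of the append matches
      · by_cases hc : (pvFL key l).1.contains (key x)
        · rw [if_pos hc, ih1, List.head?_append]
          have hsome : ((pvFL key l).1.get? s).isSome := by
            have hc' := hc
            rw [PySem.Dict.contains_eq_isSome_get?, hxs] at hc'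
            exact hc'
          rw [ih1] at hsome
          cases hh : (l.filter (fun j => decide (key j = s))).head? with
          | none => rw [hh] at hsome; simp at hsome
          | some a => rfl
        · rw [if_neg hc, PySem.Dict.get?_insert, if_pos hxs.symm]
          have hnone : (pvFL key l).1.get? s = none := by
            rw [PySem.Dict.get?_eq_none_iff_contains]
            have hc' := hc
            rw [hxs] at hc'
            simpa using hc'
          rw [ih1] at hnone
          rw [List.head?_eq_none_iff.mp hnone]
          simp
      · rw [PySem.Dict.get?_insert, if_pos hxs.symm, List.getLast?_concat]
    · have hfx : [x].filter (fun j => decide (key j = s)) = [] := by simp [hxs]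
      rw [hfx, List.append_nil]
      have hne : s ≠ key x := fun h => hxs h.symm
      constructor
      · by_cases hc : (pvFL key l).1.contains (key x)
        · rw [if_pos hc]; exact ih1
        · rw [if_neg hc, PySem.Dict.get?_insert, if_neg hne]; exact ih1
      · rw [PySem.Dict.get?_insert, if_neg hne]; exact ih2

-- ---- shapes ----
def pvSL (password : String) (i j : Int) : String := PySem.Str.slice password (some i) (some j)

def pvCondA (password u : String) : Bool := decide (1 < PySem.Str.count password u)

def pvStateB (password : String) (L : Int) : PySem.Dict String Int × PySem.Dict String Int :=
  pvFL (fun j => pvSL password j (j + L)) (PySem.List.pyRange 0 (PySem.Str.len password - L + 1) 1)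

def pvCondB (password : String) (L i : Int) : Bool :=
  decide (L ≤ (pvStateB password L).2.getD (pvSL password i (i + L)) 0 -
              (pvStateB password L).1.getD (pvSL password i (i + L)) 0)

def pvRowA (password : String) (i : Int) : List String :=
  ((PySem.List.pyRange (i + 3) (PySem.Str.len password + 1) 1).filter
      (fun j => pvCondA password (pvSL password i j))).map (fun j => pvSL password i j)

def pvLA (password : String) : List String :=
  (PySem.List.pyRange 0 (PySem.Str.len password - 2) 1).flatMap (pvRowA password)

def pvRowB (password : String) (L : Int) : List String :=
  ((PySem.List.pyRange 0 (PySem.Str.len password - L + 1) 1).filter (pvCondB password L)).map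
    (fun i => pvSL password i (i + L))

def pvLB (password : String) : List String :=
  (PySem.List.pyRange (PySem.Str.len password) 2 (-1)).flatMap (pvRowB password)

lemma A_shape (password : String) :
    check_repeated_sequences password =
      PySem.List.sorted (pvLA password) (fun t => PySem.Str.len t) true := by
  unfold check_repeated_sequences pvLA pvRowA pvCondA pvSL
  simp only [PySem.List.foldl_append_ite, PySem.List.foldl_append_eq_flatMap, List.nil_append]

lemma B_shape (password : String) :
    check_repeated_sequences_alt password = pvLB password := by
  unfold check_repeated_sequences_alt pvLB pvRowB pvCondB pvStateB pvFL pvSL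
  simp only [PySem.List.foldl_append_ite, PySem.List.foldl_append_eq_flatMap, List.nil_append]

lemma pv_flatMap_congr {α β : Type} {l : List α} {f g : α → List β}
    (h : ∀ x ∈ l, f x = g x) : l.flatMap f = l.flatMap g := by
  simp only [List.flatMap]
  exact congrArg List.flatten (List.map_congr_left h)

lemma pv_mem_pyRange_down {N L : Int} :
    L ∈ PySem.List.pyRange N 2 (-1) ↔ 3 ≤ L ∧ L ≤ N := by
  rw [PySem.List.pyRange_neg_one]
  simp only [List.mem_map, List.mem_range]
  constructor
  · rintro ⟨k, hk, rfl⟩; omega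
  · rintro ⟨h3, hN⟩; exact ⟨(N - L).toNat, by omega, by omega⟩

lemma pv_len_SL (password : String) (i j : Int) (h0 : 0 ≤ i) (hij : i ≤ j)
    (hj : j ≤ PySem.Str.len password) : PySem.Str.len (pvSL password i j) = j - i := by
  rw [PySem.Str.len_eq] at hj
  rw [pvSL, PySem.Str.len_eq, PySem.Str.toList_slice, PySem.Chars.slice_eq_listSlice,
      show i = ((i.toNat : Nat) : Int) by omega, show j = ((j.toNat : Nat) : Int) by omega,
      PySem.List.length_slice, PySem.List.clampIdx_natCast, PySem.List.clampIdx_natCast]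
  omega

lemma pv_toList_SL (password : String) (i j : Int) (h0 : 0 ≤ i) (hij : i ≤ j) :
    (pvSL password i j).toList = (password.toList.drop i.toNat).take (j.toNat - i.toNat) := by
  rw [pvSL, PySem.Str.toList_slice, PySem.Chars.slice_eq_listSlice,
      PySem.List.slice_toNat _ h0 (by omega)]

lemma pv_pairwise_pyRange_one (b : Int) :
    (PySem.List.pyRange 0 b 1).Pairwise (· < ·) := by
  rw [PySem.List.pyRange_one, List.pairwise_map]
  exact (List.pairwise_lt_range).imp (by intro a b h; omega)

lemma pv_filter_range_cut (b c : Int) (q : Int → Bool) (h0 : 0 ≤ c) (hcb : c ≤ b) :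
    (PySem.List.pyRange 0 b 1).filter (fun i => decide (i < c) && q i) =
      (PySem.List.pyRange 0 c 1).filter q := by
  rw [PySem.List.pyRange_one 0 b, PySem.List.pyRange_one 0 c]
  rw [show (b - 0).toNat = (c - 0).toNat + (b - c).toNat by omega, List.range_add,
      List.map_append, List.filter_append]
  have h2 : (List.filter (fun i => decide (i < c) && q i)
      (List.map (fun k : Nat => (0:Int) + (k : Int))
        (List.map (fun x : Nat => (c - 0).toNat + x) (List.range (b - c).toNat)))) = [] := by
    rw [List.filter_eq_nil_iff]
    intro x hx
    simp only [List.mem_map, List.mem_range] at hx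
    obtain ⟨k, ⟨m, hm, rfl⟩, rfl⟩ := hx
    simp only [Bool.and_eq_true, decide_eq_true_eq, not_and]
    intro h; omega
  rw [h2, List.append_nil, List.filter_map, List.filter_map]
  apply congrArg (List.map _)
  apply List.filter_congr
  intro k hk
  simp only [List.mem_range] at hk
  simp only [Function.comp_apply]
  have hklt : ((0:Int) + ↑k < c) := by omega
  rw [decide_eq_true hklt, Bool.true_and]

-- key equality = occurrence at that start
lemma pv_key_iff (password : String) (L i j : Int) (hL : 0 < L) (h0i : 0 ≤ i)
    (hiL : i + L ≤ PySem.Str.len password) (h0j : 0 ≤ j) :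
    pvSL password j (j + L) = pvSL password i (i + L) ↔
      (pvSL password i (i + L)).toList <+: password.toList.drop j.toNat := by
  have hN := PySem.Str.len_eq password
  have hui : (pvSL password i (i + L)).toList =
      (password.toList.drop i.toNat).take L.toNat := by
    rw [pv_toList_SL password i (i + L) h0i (by omega)]
    congr 1; omega
  have hlen : (pvSL password i (i + L)).toList.length = L.toNat := by
    rw [hui]
    simp only [List.length_take, List.length_drop]
    omega
  rw [← String.toList_inj, pv_toList_SL password j (j + L) h0j (by omega),
      show (j + L).toNat - j.toNat = L.toNat by omega]
  constructor
  · intro h; rw [← h]; exact List.take_prefix _ _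
  · intro h
    have := List.prefix_iff_eq_take.mp h
    rw [hlen] at this
    exact this.symm

-- THE core fact: A's repeat test equals B's dict test
lemma pv_cond_eq (password : String) (L i : Int) (hL : 3 ≤ L) (h0 : 0 ≤ i)
    (hiL : i + L ≤ PySem.Str.len password) :
    pvCondA password (pvSL password i (i + L)) = pvCondB password L i := by
  have hN := PySem.Str.len_eq password
  set cs := password.toList with hcs
  set s := pvSL password i (i + L) with hs
  set u := s.toList with hu
  have hu_eq : u = (cs.drop i.toNat).take L.toNat := by
    rw [hu, hs, pv_toList_SL password i (i + L) h0 (by omega)]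
    congr 1; omega
  have hlen : u.length = L.toNat := by
    rw [hu_eq]; simp only [List.length_take, List.length_drop]; omega
  have hne : u ≠ [] := by
    intro h; rw [h] at hlen; simp at hlen; omega
  set m := PySem.Str.len password - L + 1 with hm
  set F := (PySem.List.pyRange 0 m 1).filter
      (fun j => decide (pvSL password j (j + L) = s)) with hF
  have hmemF : ∀ j : Int, j ∈ F ↔ (0 ≤ j ∧ j < m) ∧ u <+: cs.drop j.toNat := by
    intro j
    rw [hF, List.mem_filter, PySem.List.mem_pyRange_one]
    constructor
    · rintro ⟨⟨hj0, hjm⟩, hk⟩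
      refine ⟨⟨hj0, hjm⟩, ?_⟩
      exact (pv_key_iff password L i j (by omega) h0 hiL hj0).mp (by simpa using hk)
    · rintro ⟨⟨hj0, hjm⟩, hk⟩
      refine ⟨⟨hj0, hjm⟩, ?_⟩
      simp only [decide_eq_true_eq]
      rw [hs]
      exact (pv_key_iff password L i j (by omega) h0 hiL hj0).mpr (by rw [← hs, ← hu]; exact hk)
  have hFpw : F.Pairwise (· < ·) := List.Pairwise.filter _ (pv_pairwise_pyRange_one m)
  have hiF : i ∈ F := by
    rw [hmemF]
    exact ⟨⟨h0, by omega⟩, by rw [hu_eq]; exact List.take_prefix _ _⟩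
  obtain ⟨p0, hHead⟩ : ∃ p0, F.head? = some p0 := by
    cases hh : F.head? with
    | none => exact absurd (List.head?_eq_none_iff.mp hh ▸ hiF) (List.not_mem_nil)
    | some a => exact ⟨a, rfl⟩
  obtain ⟨q1, hLast⟩ : ∃ q1, F.getLast? = some q1 := by
    cases hh : F.getLast? with
    | none => exact absurd (List.getLast?_eq_none_iff.mp hh ▸ hiF) (List.not_mem_nil)
    | some a => exact ⟨a, rfl⟩
  have hp0F : p0 ∈ F := List.mem_of_mem_head? hHead
  have hq1F : q1 ∈ F := List.mem_of_getLast? hLast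
  have hmin : ∀ y ∈ F, p0 ≤ y := pv_head_min hFpw hHead
  have hmax : ∀ y ∈ F, y ≤ q1 := pv_getLast_max hFpw hLast
  -- p0 is the find position
  have hocc : u <:+: cs := by
    have := (hmemF i).mp hiF
    exact this.2.isInfix.trans (List.drop_suffix i.toNat cs).isInfix
  set fi := PySem.Chars.find cs u with hfi
  have hfi0 : 0 ≤ fi := (PySem.Chars.find_nonneg_iff cs u).mpr hocc
  obtain ⟨hfpre, hfmin⟩ := PySem.Chars.find_spec hfi0
  have hfit : ∀ r : Nat, u <+: cs.drop r → (r : Int) < m := by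
    intro r hr
    have h1 := hr.length_le
    simp only [List.length_drop] at h1
    omega
  have hfiF : fi ∈ F := by
    rw [hmemF]
    refine ⟨⟨hfi0, ?_⟩, hfpre⟩
    have := hfit fi.toNat hfpre
    omega
  have hp0fi : p0 = fi := by
    have h1 : p0 ≤ fi := hmin fi hfiF
    have h2 : ¬ p0 < fi := by
      intro hlt
      have hp := (hmemF p0).mp hp0F
      exact hfmin p0.toNat (by omega) hp.2
    omega
  -- the infix-after test is "last occurrence at least fi + L"
  have hiff : u <:+: cs.drop (fi.toNat + u.length) ↔ fi + L ≤ q1 := by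
    rw [hlen]
    constructor
    · intro h
      obtain ⟨r, hr⟩ := (pv_infix_iff_drop u _).mp h
      rw [pv_drop_drop] at hr
      have hrm := hfit (fi.toNat + L.toNat + r) hr
      have hmem : ((fi.toNat + L.toNat + r : Nat) : Int) ∈ F := by
        rw [hmemF]
        refine ⟨⟨by omega, by exact_mod_cast hrm⟩, ?_⟩
        rw [Int.toNat_natCast]
        exact hr
      have := hmax _ hmem
      omega
    · intro h
      have hq := (hmemF q1).mp hq1F
      have hsplit : cs.drop q1.toNat = (cs.drop (fi.toNat + L.toNat)).drop
          (q1.toNat - (fi.toNat + L.toNat)) := by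
        rw [pv_drop_drop]
        congr 1
        omega
      rw [hsplit] at hq
      exact hq.2.isInfix.trans (List.drop_suffix _ _).isInfix
  -- assemble
  rw [pvCondA, pvCondB, ← hs]
  rw [PySem.Str.count_eq, ← hcs, ← hu]
  obtain ⟨hfst, hlst⟩ := pvFL_get (fun j => pvSL password j (j + L))
    (PySem.List.pyRange 0 (PySem.Str.len password - L + 1) 1) s
  have hstate : pvStateB password L = pvFL (fun j => pvSL password j (j + L))
      (PySem.List.pyRange 0 (PySem.Str.len password - L + 1) 1) := rfl
  rw [hstate, PySem.Dict.getD_eq_get?_getD, PySem.Dict.getD_eq_get?_getD, hfst, hlst]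
  rw [show (PySem.List.pyRange 0 (PySem.Str.len password - L + 1) 1).filter
        (fun j => decide (pvSL password j (j + L) = s)) = F by rw [hF, hm]]
  rw [hHead, hLast]
  simp only [Option.getD_some]
  apply decide_eq_decide.mpr
  rw [count_gt_one_iff cs u hne hocc, ← hfi, hiff, hp0fi]
  omega

lemma pv_row_eq (password : String) (L : Int) (hL3 : 3 ≤ L)
    (hLN : L ≤ PySem.Str.len password) :
    (pvLA password).filter (fun y => decide (PySem.Str.len y = L)) = pvRowB password L := by
  set N := PySem.Str.len password with hN
  rw [pvLA, pv_filter_flatMap]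
  have hper : ∀ i ∈ PySem.List.pyRange 0 (N - 2) 1,
      (pvRowA password i).filter (fun y => decide (PySem.Str.len y = L)) =
      if (decide (i < N - L + 1) && pvCondA password (pvSL password i (i + L))) then
        [pvSL password i (i + L)] else [] := by
    intro i hi
    rw [PySem.List.mem_pyRange_one] at hi
    rw [pvRowA, List.filter_map, List.filter_filter]
    have hjr : ∀ j ∈ PySem.List.pyRange (i + 3) (N + 1) 1,
        (((fun y => decide (PySem.Str.len y = L)) ∘ fun j => pvSL password i j) j &&
          pvCondA password (pvSL password i j)) =
        (decide (j = i + L) && pvCondA password (pvSL password i j)) := by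
      intro j hj
      rw [PySem.List.mem_pyRange_one] at hj
      simp only [Function.comp_apply]
      congr 1
      rw [pv_len_SL password i j hi.1 (by omega) (by omega)]
      apply decide_eq_decide.mpr
      omega
    rw [List.filter_congr hjr,
        pv_filter_eq_singleton (PySem.List.nodup_pyRange_one _ _) (i + L)
          (fun j => pvCondA password (pvSL password i (j))),
        apply_ite (List.map (fun j => pvSL password i j))]
    simp only [List.map_cons, List.map_nil]
    by_cases hc : pvCondA password (pvSL password i (i + L)) = true
    · by_cases hi2 : i < N - L + 1
      · rw [if_pos ⟨PySem.List.mem_pyRange_one.mpr ⟨by omega, by omega⟩, hc⟩,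
            if_pos (by simp [hi2, hc])]
      · rw [if_neg (by
            rintro ⟨hm, _⟩
            rw [PySem.List.mem_pyRange_one] at hm
            omega),
          if_neg (by simp [hi2])]
    · rw [if_neg (by rintro ⟨_, hcc⟩; exact hc hcc), if_neg (by simp [hc])]
  rw [pv_flatMap_congr hper, pv_flatMap_if_singleton,
      pv_filter_range_cut (N - 2) (N - L + 1) _ (by omega) (by omega), pvRowB, ← hN]
  congr 1
  apply List.filter_congr
  intro i hi
  rw [PySem.List.mem_pyRange_one] at hi
  exact pv_cond_eq password L i hL3 hi.1 (by omega)

lemma insertBy_append_not_before {α : Type} (b : α → α → Bool) (x : α) (l1 l2 : List α)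
    (h : ∀ y ∈ l1, b x y = false) :
    PySem.List.insertBy b x (l1 ++ l2) = l1 ++ PySem.List.insertBy b x l2 := by
  induction l1 with
  | nil => simp
  | cons y ys ih =>
    simp only [List.cons_append, PySem.List.insertBy]
    rw [h y (by simp), ih (fun z hz => h z (by simp [hz]))]
    simp

lemma insertBy_all_before {α : Type} (b : α → α → Bool) (x : α) (l : List α)
    (h : ∀ y ∈ l, b x y = true) :
    PySem.List.insertBy b x l = x :: l := by
  cases l with
  | nil => simp [PySem.List.insertBy]
  | cons y ys => simp [PySem.List.insertBy, h y (by simp)]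

lemma insert_group {α : Type} (key : α → Int) (x : α) (xs : List α) (D : List Int)
    (hD : D.Pairwise (· > ·)) (hx : key x ∈ D) :
    PySem.List.insertBy (fun a b => decide (key b < key a)) x
        (D.flatMap (fun k => xs.filter (fun y => decide (key y = k)))) =
      D.flatMap (fun k => (xs ++ [x]).filter (fun y => decide (key y = k))) := by
  induction D with
  | nil => simp at hx
  | cons k D' ih =>
    rw [List.pairwise_cons] at hD
    simp only [List.flatMap_cons]
    by_cases hk : key x = k
    · rw [insertBy_append_not_before _ _ _ _
        (by intro y hy; simp only [List.mem_filter] at hy; simp [hk, decide_eq_true_eq.mp hy.2])]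
      rw [insertBy_all_before _ _ _ (by
        intro y hy
        simp only [List.mem_flatMap, List.mem_filter] at hy
        obtain ⟨k', hk', _, hky⟩ := hy
        simp only [decide_eq_true_eq]
        have := hD.1 k' hk'
        rw [decide_eq_true_eq.mp hky, hk]
        omega)]
      rw [List.filter_append]
      have hxf : [x].filter (fun y => decide (key y = k)) = [x] := by simp [hk]
      rw [hxf]
      have : D'.flatMap (fun k' => (xs ++ [x]).filter (fun y => decide (key y = k'))) =
          D'.flatMap (fun k' => xs.filter (fun y => decide (key y = k'))) := by
        apply congrArg List.flatten
        apply List.map_congr_left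
        intro k' hk'
        rw [List.filter_append]
        have : [x].filter (fun y => decide (key y = k')) = [] := by
          simp only [List.filter_cons, List.filter_nil]
          have := hD.1 k' hk'
          rw [if_neg (by simp; omega)]
        simp [this]
      rw [this]
      simp
    · have hx' : key x ∈ D' := by cases hx with
        | head => exact absurd rfl hk
        | tail _ h => exact h
      have hlt : key x < k := by
        have := hD.1 _ hx'; omega
      rw [insertBy_append_not_before _ _ _ _
        (by intro y hy; simp only [List.mem_filter] at hy
            simp only [decide_eq_false_iff_not, not_lt]
            rw [decide_eq_true_eq.mp hy.2]; omega)]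
      rw [ih hD.2 hx']
      rw [List.filter_append]
      have : [x].filter (fun y => decide (key y = k)) = [] := by simp [hk]
      rw [this]
      simp

lemma sorted_rev_groups {α : Type} (key : α → Int) (xs : List α) (D : List Int)
    (hD : D.Pairwise (· > ·)) (hcov : ∀ y ∈ xs, key y ∈ D) :
    PySem.List.sorted xs key true = D.flatMap (fun k => xs.filter (fun y => decide (key y = k))) := by
  rw [PySem.List.sorted_rev_eq_foldl_insertBy]
  induction xs using List.reverseRecOn with
  | nil => simp
  | append_singleton xs x ih =>
    rw [List.foldl_append]
    simp only [List.foldl_cons, List.foldl_nil]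
    rw [ih (fun y hy => hcov y (by simp [hy]))]
    exact insert_group key x xs D hD (hcov x (by simp))

lemma pv_main (password : String) :
    check_repeated_sequences password = check_repeated_sequences_alt password := by
  have hD : (PySem.List.pyRange (PySem.Str.len password) 2 (-1)).Pairwise (· > ·) := by
    rw [PySem.List.pyRange_neg_one, List.pairwise_map]
    exact (List.pairwise_lt_range).imp (by intro a b h; omega)
  have hcov : ∀ y ∈ pvLA password,
      PySem.Str.len y ∈ PySem.List.pyRange (PySem.Str.len password) 2 (-1) := by
    intro y hy
    rw [pv_mem_pyRange_down]
    rw [pvLA] at hy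
    simp only [List.mem_flatMap, pvRowA, List.mem_map, List.mem_filter,
      PySem.List.mem_pyRange_one] at hy
    obtain ⟨i, hi, j, ⟨hj, _⟩, rfl⟩ := hy
    rw [pv_len_SL password i j hi.1 (by omega) (by omega)]
    omega
  rw [A_shape, B_shape,
      sorted_rev_groups (fun t => PySem.Str.len t) (pvLA password)
        (PySem.List.pyRange (PySem.Str.len password) 2 (-1)) hD hcov,
      pvLB]
  apply pv_flatMap_congr
  intro L hL
  rw [pv_mem_pyRange_down] at hL
  exact pv_row_eq password L hL.1 hL.2

-- ===== VERDICT (by name: the statement is the Claim_ definition above) =====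
theorem check_repeated_sequences_spec : Claim_equal_check_repeated_sequences := by
  intro password _
  exact pv_main password
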